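-- pv_equiv track=rewrite | github.com/Heng-zm/bot-voice | main.py | _paginate_plain
-- ===== SOURCE A (Python) =====
-- TELE_MSG_LIMIT = 4000
--
-- def _paginate_plain(text: str, limit: int = TELE_MSG_LIMIT) -> list[str]:
--     text = text.strip()
--     if not text:
--         return []
--     if len(text) <= limit:
--         return [text]
--     pages = []
--     while text:
--         if len(text) <= limit:
--             pages.append(text)
--             break
--         cut = text.rfind("\n", 0, limit)
--         if cut <= 0:
--             cut = limit
--         pages.append(text[:cut])
--         text = text[cut:].lstrip("\n")
--     return pages
-- ===== SOURCE B (Python) =====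
-- TELE_MSG_LIMIT = 4000
--
-- def _paginate_plain(text: str, limit: int = TELE_MSG_LIMIT) -> list[str]:
--     s = text.strip()
--     if not s:
--         return []
--     n = len(s)
--     pages = []
--     i = 0
--     while n - i > limit:
--         cut = s.rfind("\n", i, i + limit)
--         if cut <= i:  # no newline strictly inside the window: hard cut
--             cut = i + limit
--         pages.append(s[i:cut])
--         i = cut
--         while i < n and s[i] == "\n":
--             i += 1
--     pages.append(s[i:])
--     return pages
-- ===== Notes on version B (the rewrite author's own statement) =====
-- stated objective: faster
-- what changed: B replaces A's repeated suffix re-slicing (text = text[cut:].lstrip('\n') copies the whole remaining string on every page) by a single index cursor into the original string, calling rfind with start/end bounds and slicing only the emitted page, so no O(n) suffix copies are made.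
import Mathlib
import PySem

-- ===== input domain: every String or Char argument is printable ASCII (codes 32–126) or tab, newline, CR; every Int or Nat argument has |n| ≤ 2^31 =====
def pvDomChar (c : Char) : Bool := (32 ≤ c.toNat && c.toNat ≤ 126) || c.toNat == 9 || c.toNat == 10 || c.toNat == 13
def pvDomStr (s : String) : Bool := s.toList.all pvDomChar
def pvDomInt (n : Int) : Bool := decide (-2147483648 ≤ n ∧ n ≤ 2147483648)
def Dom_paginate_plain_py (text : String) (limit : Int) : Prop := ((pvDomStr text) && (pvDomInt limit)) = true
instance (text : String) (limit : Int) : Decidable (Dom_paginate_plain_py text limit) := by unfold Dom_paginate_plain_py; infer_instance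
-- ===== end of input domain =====

-- B paginates with an index cursor and bounded rfind on the original string instead of A's
-- repeated suffix copies; return values proved equal whenever Python A terminates (Pre_).

-- ===== PORT A =====
-- A's 'while text:' loop; the fuel argument only makes the recursion total (Python A never
-- terminates when limit ≤ 0 and the stripped text is nonempty; Pre_ excludes exactly that).
-- text.lstrip("\n") is ported by hand as dropWhile (· == '\n'): exact (drops exactly the leading '\n's).
def pagALoop : Nat → List Char → Int → List (List Char) → List (List Char)
  | 0, _, _, pages => pages
  | fuel+1, t, limit, pages =>
    if t = [] then pages
    else if (t.length : Int) ≤ limit then pages ++ [t]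
    else
      let cut0 := PySem.Chars.rfindFrom t ['\n'] 0 (some limit)
      let cut := if cut0 ≤ 0 then limit else cut0
      pagALoop fuel ((PySem.Chars.slice t (some cut) none).dropWhile (· == '\n')) limit
        (pages ++ [PySem.Chars.slice t none (some cut)])

def paginate_plain_py (text : String) (limit : Int) : List String :=
  let t := PySem.Chars.strip text.toList
  if t = [] then []
  else if (t.length : Int) ≤ limit then [String.mk t]
  else (pagALoop (t.length + 1) t limit []).map String.mk

-- ===== PORT B =====
-- exact port of B's inner 'while i < n and s[i] == "\n": i += 1'
def skipNl (s : List Char) (j : Nat) : Nat :=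
  if h : j < s.length then
    if s[j] = '\n' then skipNl s (j+1) else j
  else j
termination_by s.length - j

-- B's 'while n - i > limit:' loop; fuel only makes the recursion total (cf. pagALoop).
def pagBLoop : Nat → List Char → Int → Nat → List (List Char) → List (List Char)
  | 0, _, _, _, pages => pages
  | fuel+1, s, limit, i, pages =>
    if (s.length : Int) - (i : Int) ≤ limit then pages ++ [s.drop i]
    else
      let cut0 := PySem.Chars.rfindFrom s ['\n'] (i : Int) (some ((i : Int) + limit))
      let cut := if cut0 ≤ (i : Int) then (i : Int) + limit else cut0
      pagBLoop fuel s limit (skipNl s cut.toNat) (pages ++ [PySem.Chars.slice s (some (i : Int)) (some cut)])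

def paginate_plain_py_alt (text : String) (limit : Int) : List String :=
  let s := PySem.Chars.strip text.toList
  if s = [] then []
  else (pagBLoop (s.length + 1) s limit 0 []).map String.mk

-- ===== PRECONDITION & SPEC =====
-- Pre_ excludes limit ≤ 0 together with nonblank text: on those inputs Python A loops forever
-- (text never shrinks), so A returns no value at all; everywhere A returns, Pre_ holds.
def Pre_paginate_plain_py (text : String) (limit : Int) : Prop :=
  1 ≤ limit ∨ PySem.Chars.strip text.toList = []
instance (text : String) (limit : Int) : Decidable (Pre_paginate_plain_py text limit) := by
  unfold Pre_paginate_plain_py; infer_instance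

def pvWitness_paginate_plain_py : String × Int := ("hello\nworld", 4)

def Spec_paginate_plain_py (text : String) (limit : Int) (out : List String) : Prop := out = paginate_plain_py_alt text limit
instance (text : String) (limit : Int) (out : List String) : Decidable (Spec_paginate_plain_py text limit out) := by unfold Spec_paginate_plain_py; infer_instance

-- ===== CLAIM (what is proved, stated in full; the proofs are below) =====
def Claim_equal_paginate_plain_py : Prop := ∀ (text : String) (limit : Int), Dom_paginate_plain_py text limit → Pre_paginate_plain_py text limit → Spec_paginate_plain_py text limit (paginate_plain_py text limit)

-- ===== LEMMAS AND PROOFS =====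

-- rfind.go returns -1 or a position ≤ k where sub is a prefix of the drop
lemma rfind_go_cases (s sub : List Char) (k : Nat) :
    PySem.Chars.rfind.go s sub k = -1 ∨
      (0 ≤ PySem.Chars.rfind.go s sub k ∧ (PySem.Chars.rfind.go s sub k).toNat ≤ k ∧
        sub.isPrefixOf (s.drop (PySem.Chars.rfind.go s sub k).toNat)) := by
  induction k with
  | zero =>
    rw [PySem.Chars.rfind.go]
    split_ifs with h
    · right; simpa using h
    · left; rfl
  | succ j ih =>
    rw [PySem.Chars.rfind.go]
    split_ifs with h
    · right
      refine ⟨by positivity, by simp, by simpa using h⟩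
    · rcases ih with h1 | ⟨h1, h2, h3⟩
      · left; exact h1
      · right; exact ⟨h1, le_trans h2 (by omega), h3⟩

-- rfind for the nonempty pattern ['\n']: -1 or an in-range index
lemma rfind_nl_cases (u : List Char) :
    PySem.Chars.rfind u ['\n'] = -1 ∨
      (0 ≤ PySem.Chars.rfind u ['\n'] ∧ (PySem.Chars.rfind u ['\n']).toNat < u.length) := by
  rw [PySem.Chars.rfind]
  rcases rfind_go_cases u ['\n'] u.length with h | ⟨h1, h2, h3⟩
  · left; exact h
  · right
    refine ⟨h1, ?_⟩
    by_contra hge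
    have : u.drop (PySem.Chars.rfind.go u ['\n'] u.length).toNat = [] := by
      simp only [List.drop_eq_nil_iff]
      omega
    rw [this] at h3
    simp at h3

-- A's rfind("\n", 0, limit) on the current suffix, expressed through plain rfind
lemma rfindFrom_zero (t : List Char) (limit : Int) (hlim : 1 ≤ limit) :
    PySem.Chars.rfindFrom t ['\n'] 0 (some limit) =
      (if PySem.Chars.rfind (t.take limit.toNat) ['\n'] = -1 then -1
       else PySem.Chars.rfind (t.take limit.toNat) ['\n']) := by
  rw [PySem.Chars.rfindFrom]
  simp only
  by_cases h : (t.length:Int) < limit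
  · rw [if_pos h, List.take_of_length_le (by omega : t.length ≤ limit.toNat)]
    split_ifs <;> simp_all <;> omega
  · rw [if_neg h]
    split_ifs <;> simp_all <;> omega

-- B's rfind("\n", i, i+limit) on the whole string, expressed through the same plain rfind
lemma rfindFrom_abs (s : List Char) (i : Nat) (limit : Int) (hlim : 1 ≤ limit)
    (hin : (i : Int) + limit < s.length) :
    PySem.Chars.rfindFrom s ['\n'] (i : Int) (some ((i : Int) + limit)) =
      (if PySem.Chars.rfind ((s.drop i).take limit.toNat) ['\n'] = -1 then -1
       else (i : Int) + PySem.Chars.rfind ((s.drop i).take limit.toNat) ['\n']) := by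
  rw [PySem.Chars.rfindFrom]
  simp only [if_neg (show ¬((s.length:Int) < (i:Int)+limit) by omega),
    if_neg (show ¬((i:Int)+limit < 0) by omega),
    if_neg (show ¬((i:Int) < 0) by omega),
    if_neg (show ¬((i:Int)+limit < (i:Int)) by omega)]
  have htake : List.drop ((i:Int)).toNat (List.take ((i:Int)+limit).toNat s) = (s.drop i).take limit.toNat := by
    rw [List.drop_take]
    congr 1
    omega
  rw [htake]

-- skipping '\n's with the cursor is lstrip("\n") on the suffix
lemma skipNl_drop (s : List Char) (j : Nat) :
    s.drop (skipNl s j) = (s.drop j).dropWhile (· == '\n') := by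
  fun_induction skipNl s j with
  | case1 j h hc ih =>
    rw [ih, List.drop_eq_getElem_cons h, List.dropWhile_cons]
    simp [hc]
  | case2 j h hc =>
    conv_rhs => rw [List.drop_eq_getElem_cons h, List.dropWhile_cons]
    simp [hc]
  | case3 j h =>
    rw [List.drop_eq_nil_iff.mpr (by omega)]
    simp

-- if the last character is not '\n', the cursor never runs off the end
lemma skipNl_lt (s : List Char) (j : Nat) (hj : j < s.length) (hlast : s.getLast? ≠ some '\n') :
    skipNl s j < s.length := by
  fun_induction skipNl s j with
  | case1 j h hc ih =>
    apply ih
    rcases Nat.lt_or_ge (j+1) s.length with h2 | h2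
    · exact h2
    · exfalso
      apply hlast
      rw [← hc]
      rw [List.getLast?_eq_getElem?, List.getElem?_eq_getElem (by omega : s.length - 1 < s.length)]
      congr
      omega
  | case2 j h hc => exact h
  | case3 j h => omega

-- a stripped string does not end in '\n'
lemma strip_last (l : List Char) : (PySem.Chars.strip l).getLast? ≠ some '\n' := by
  rw [PySem.Chars.strip, PySem.Chars.rstrip]
  intro h
  rw [List.getLast?_reverse] at h
  cases hd : List.dropWhile PySem.Chars.isspace (PySem.Chars.lstrip l).reverse with
  | nil => rw [hd] at h; simp at h
  | cons a t =>
    rw [hd] at h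
    simp at h
    have hh := List.head_dropWhile_not PySem.Chars.isspace (l := (PySem.Chars.lstrip l).reverse) (by rw [hd]; simp)
    simp only [hd, List.head_cons] at hh
    rw [h] at hh
    simp [PySem.Chars.isspace] at hh

-- the two loops agree: A's suffix state is s.drop i for B's cursor i
lemma loop_corr (limit : Int) (hlim : 1 ≤ limit) (fuel : Nat) :
    ∀ (s : List Char), s.getLast? ≠ some '\n' → ∀ (i : Nat) (pages : List (List Char)), i < s.length →
      pagALoop fuel (s.drop i) limit pages = pagBLoop fuel s limit i pages := by
  induction fuel with
  | zero => intro s _ i pages _; rfl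
  | succ fuel ih =>
    intro s hlast i pages hi
    rw [pagALoop, pagBLoop]
    rw [if_neg (show ¬ s.drop i = [] by simp only [List.drop_eq_nil_iff]; omega)]
    have hlen : ((s.drop i).length : Int) = (s.length : Int) - i := by
      simp only [List.length_drop]; omega
    by_cases hle : (s.length : Int) - (i : Int) ≤ limit
    · rw [if_pos (by rw [hlen]; exact hle), if_pos hle]
    · rw [if_neg (by rw [hlen]; exact hle), if_neg hle]
      have hin : (i : Int) + limit < s.length := by omega
      simp only [rfindFrom_zero (s.drop i) limit hlim, rfindFrom_abs s i limit hlim hin]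
      set r := PySem.Chars.rfind ((s.drop i).take limit.toNat) ['\n'] with hrdef
      have hrb : (i : Int) + limit < s.length ∧ (0 ≤ r → (i : Int) + r < s.length) := by
        refine ⟨hin, fun h0 => ?_⟩
        rcases rfind_nl_cases ((s.drop i).take limit.toNat) with hneg | ⟨h1, h2⟩
        · rw [← hrdef] at hneg; omega
        · rw [← hrdef] at h1 h2
          rw [List.length_take, List.length_drop] at h2
          omega
      obtain ⟨c, hc1, hclt, hA, hB⟩ :
          ∃ c : Int, 1 ≤ c ∧ (i : Int) + c < s.length ∧
            (if (if r = -1 then (-1:Int) else r) ≤ 0 then limit else if r = -1 then (-1:Int) else r) = c ∧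
            (if (if r = -1 then (-1:Int) else (i:Int) + r) ≤ (i:Int) then (i:Int) + limit
              else if r = -1 then (-1:Int) else (i:Int) + r) = (i : Int) + c := by
        by_cases hneg : r = -1
        · exact ⟨limit, hlim, by omega, by split_ifs <;> omega, by split_ifs <;> omega⟩
        · have h0 : 0 ≤ r := by
            rcases rfind_nl_cases ((s.drop i).take limit.toNat) with h | ⟨h1, _⟩
            · rw [← hrdef] at h; exact absurd h hneg
            · rw [← hrdef] at h1; exact h1
          by_cases hz : r ≤ 0
          · exact ⟨limit, hlim, by omega, by split_ifs <;> omega, by split_ifs <;> omega⟩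
          · exact ⟨r, by omega, hrb.2 h0, by split_ifs <;> omega, by split_ifs <;> omega⟩
      rw [hA, hB]
      have hpage : PySem.Chars.slice (s.drop i) none (some c) =
          PySem.Chars.slice s (some (i : Int)) (some ((i : Int) + c)) := by
        simp only [PySem.Chars.slice_eq_listSlice]
        rw [PySem.List.slice_to _ (by omega : (0:Int) ≤ c),
          PySem.List.slice_toNat _ (by omega : (0:Int) ≤ (i:Int)) (by omega : (0:Int) ≤ (i:Int) + c)]
        simp only [Int.toNat_natCast]
        congr 1
        omega
      have hnext : (PySem.Chars.slice (s.drop i) (some c) none).dropWhile (· == '\n') =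
          s.drop (skipNl s ((i : Int) + c).toNat) := by
        simp only [PySem.Chars.slice_eq_listSlice]
        rw [PySem.List.slice_from _ (by omega : (0:Int) ≤ c), List.drop_drop,
          skipNl_drop]
        have hnat : ((i : Int) + c).toNat = i + c.toNat := by omega
        rw [hnat]
      rw [hpage, hnext]
      exact ih s hlast (skipNl s ((i : Int) + c).toNat) _
        (skipNl_lt s _ (by omega) hlast)

-- ===== VERDICT (by name: the statement is the Claim_ definition above) =====
theorem paginate_plain_py_spec : Claim_equal_paginate_plain_py := by
  unfold Claim_equal_paginate_plain_py
  intro text limit _ hpre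
  unfold Spec_paginate_plain_py paginate_plain_py paginate_plain_py_alt
  simp only
  by_cases hnil : PySem.Chars.strip text.toList = []
  · rw [if_pos hnil, if_pos hnil]
  · rw [if_neg hnil, if_neg hnil]
    have hlim : 1 ≤ limit := by
      rcases hpre with h | h
      · exact h
      · exact absurd h hnil
    by_cases hle : ((PySem.Chars.strip text.toList).length : Int) ≤ limit
    · rw [if_pos hle, pagBLoop,
        if_pos (by push_cast; omega : ((PySem.Chars.strip text.toList).length : Int) - ((0:Nat) : Int) ≤ limit)]
      simp
    · rw [if_neg hle]
      have hcorr := loop_corr limit hlim ((PySem.Chars.strip text.toList).length + 1)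
        (PySem.Chars.strip text.toList) (strip_last text.toList) 0 []
        (by rw [List.length_pos_iff]; exact hnil)
      rw [List.drop_zero] at hcorr
      rw [hcorr]
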